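-- pv_equiv track=rewrite | github.com/MaxFunProger/sudoku | main.py | output_grid
-- ===== SOURCE A (Python) =====
-- def output_grid(grid):
--     grid = grid.replace('.', '_')
--     p = ''
--     sch = 0
--     for i in range(19):
--         if i % 2 == 0:
--             p += '#' * 20 + '\n'
--         else:
--             p += '#'.join(grid[sch * 9:sch * 9 + 9]) + '\n'
--             sch += 1
--     return p
-- ===== SOURCE B (Python) =====
-- def output_grid(grid):
--     # Single left-to-right streaming pass over the first 81 input characters:
--     # rows are accumulated character by character (with '.'->'_' done per char),
--     # flushed every 9 chars, and missing rows padded at the end; no slicing,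
--     # no replace pass, no parity loop.
--     border = '#' * 20
--     parts = [border]
--     row = ''
--     filled = 0
--     done = 0
--     for ch in grid[:81]:
--         if filled:
--             row += '#'
--         row += '_' if ch == '.' else ch
--         filled += 1
--         if filled == 9:
--             parts.append(row)
--             parts.append(border)
--             row = ''
--             filled = 0
--             done += 1
--     while done < 9:
--         parts.append(row)
--         parts.append(border)
--         row = ''
--         done += 1
--     return '\n'.join(parts) + '\n'
-- ===== Notes on version B (the rewrite author's own statement) =====
-- stated objective: alternative
-- what changed: Replaces A's 19-iteration parity-branch loop over computed slices of a pre-replaced string by a single streaming pass over the first 81 input characters that translates dots to underscores per character, accumulates a row, flushes it every 9 chars, pads missing rows, and joins the parts with newlines.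
import Mathlib
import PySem

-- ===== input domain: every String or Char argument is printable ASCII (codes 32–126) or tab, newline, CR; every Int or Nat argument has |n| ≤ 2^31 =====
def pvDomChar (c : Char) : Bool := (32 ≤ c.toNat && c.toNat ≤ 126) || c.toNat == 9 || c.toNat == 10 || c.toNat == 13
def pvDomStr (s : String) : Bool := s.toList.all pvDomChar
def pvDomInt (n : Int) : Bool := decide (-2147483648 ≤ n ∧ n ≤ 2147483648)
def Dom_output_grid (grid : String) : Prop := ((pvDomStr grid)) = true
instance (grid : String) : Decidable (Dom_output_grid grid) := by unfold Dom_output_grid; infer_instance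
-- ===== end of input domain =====

-- B replaces A's 19-iteration parity loop over slices by a single streaming pass over the first 81 input characters (per-char dot-to-underscore translation, rows flushed every 9 chars, missing rows padded), joined at the end; objective: alternative decomposition, same cost.


-- ===== PORT A =====
def output_grid (grid : String) : String :=
  let g : List Char := PySem.Chars.replace grid.toList ['.'] ['_']
  let step : (List Char × Int) → Int → (List Char × Int) := fun st i =>
    if i % 2 == 0 then
      (st.1 ++ (List.replicate 20 '#' ++ ['\n']), st.2)
    else
      (st.1 ++ (PySem.Chars.join ['#']
          ((PySem.List.slice g (some (st.2 * 9)) (some (st.2 * 9 + 9))).map (fun c => [c])) ++ ['\n']),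
       st.2 + 1)
  String.ofList ((PySem.List.pyRange 0 19 1).foldl step ([], 0)).1

-- ===== PORT B =====
-- border = '#' * 20
def pvBorder : List Char := List.replicate 20 '#'

-- one character of the streaming pass: state (parts, row, filled, done)
def pvStep (st : List (List Char) × List Char × Nat × Nat) (ch : Char) :
    List (List Char) × List Char × Nat × Nat :=
  let row := if st.2.2.1 ≠ 0 then st.2.1 ++ ['#'] else st.2.1
  let row := row ++ [if ch = '.' then '_' else ch]
  let filled := st.2.2.1 + 1
  if filled = 9 then (st.1 ++ [row, pvBorder], [], 0, st.2.2.2 + 1)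
  else (st.1, row, filled, st.2.2.2)

-- while done < 9: flush the (possibly partial) row and a border
def pvPad (parts : List (List Char)) (row : List Char) (done : Nat) : List (List Char) :=
  if done < 9 then pvPad (parts ++ [row, pvBorder]) [] (done + 1) else parts
termination_by 9 - done

def output_grid_alt (grid : String) : String :=
  let st := (PySem.List.slice grid.toList none (some 81)).foldl pvStep ([pvBorder], [], 0, 0)
  String.ofList (PySem.Chars.join ['\n'] (pvPad st.1 st.2.1 st.2.2.2) ++ ['\n'])

-- ===== PRECONDITION & SPEC =====
def Spec_output_grid (grid : String) (out : String) : Prop := out = output_grid_alt grid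
instance (grid : String) (out : String) : Decidable (Spec_output_grid grid out) := by unfold Spec_output_grid; infer_instance

-- ===== CLAIM (what is proved, stated in full; the proofs are below) =====
def Claim_equal_output_grid : Prop := ∀ (grid : String), Dom_output_grid grid → Spec_output_grid grid (output_grid grid)

-- ===== LEMMAS AND PROOFS =====

-- the per-character replacement A performs via str.replace and B performs inline
def fch (c : Char) : Char := if c = '.' then '_' else c

-- the joined form of one data row built from raw chars cs
def rowF (cs : List Char) : List Char :=
  match cs with
  | [] => []
  | c :: t => fch c :: t.flatMap (fun x => ['#', fch x])

-- the 2k display lines produced for the (remaining) raw chars l and k remaining rows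
def rowsF : List Char → Nat → List (List Char)
  | _, 0 => []
  | l, k + 1 => rowF (l.take 9) :: pvBorder :: rowsF (l.drop 9) k

lemma go_single (fuel : Nat) : ∀ (l acc : List Char), l.length ≤ fuel →
    PySem.Chars.replace.go ['.'] ['_'] fuel l acc = acc.reverse ++ l.map fch := by
  induction fuel with
  | zero =>
    intro l acc h
    interval_cases hl : l.length
    simp_all [PySem.Chars.replace.go, List.length_eq_zero_iff]
  | succ n ih =>
    intro l acc h
    cases l with
    | nil => simp [PySem.Chars.replace.go]
    | cons c t =>
      by_cases hc : c = '.'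
      · subst hc
        rw [PySem.Chars.replace.go]
        simp only [List.isPrefixOf]
        simp [ih t _ (by simpa using h), fch]
      · rw [PySem.Chars.replace.go]
        simp only [List.isPrefixOf]
        simp [hc, Ne.symm hc, ih t _ (by simpa using h), fch]

lemma replace_single (l : List Char) : PySem.Chars.replace l ['.'] ['_'] = l.map fch := by
  simp [PySem.Chars.replace, go_single l.length l [] le_rfl]

lemma rowF_join (cs : List Char) :
    PySem.Chars.join ['#'] ((cs.map fch).map (fun c => [c])) = rowF cs := by
  induction cs with
  | nil => simp [rowF, PySem.Chars.join, List.intercalate]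
  | cons c t ih =>
    cases t with
    | nil => simp [rowF, PySem.Chars.join, List.intercalate]
    | cons d u =>
      simp only [List.map_cons] at ih ⊢
      rw [PySem.Chars.join_cons_cons, ih]
      simp [rowF]

-- folding pvStep through a full 9-character chunk flushes exactly one row
lemma chunk (h : List Char) (hh : h.length = 9) (rest : List Char)
    (parts : List (List Char)) (d : Nat) :
    List.foldl pvStep (parts, [], 0, d) (h ++ rest)
      = List.foldl pvStep (parts ++ [rowF h, pvBorder], [], 0, d + 1) rest := by
  rcases h with _ | ⟨a1, h⟩; · simp at hh
  rcases h with _ | ⟨a2, h⟩; · simp at hh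
  rcases h with _ | ⟨a3, h⟩; · simp at hh
  rcases h with _ | ⟨a4, h⟩; · simp at hh
  rcases h with _ | ⟨a5, h⟩; · simp at hh
  rcases h with _ | ⟨a6, h⟩; · simp at hh
  rcases h with _ | ⟨a7, h⟩; · simp at hh
  rcases h with _ | ⟨a8, h⟩; · simp at hh
  rcases h with _ | ⟨a9, h⟩; · simp at hh
  have hnil : h = [] := by simpa using hh
  subst hnil
  simp [pvStep, rowF, fch]

-- a short suffix never flushes: it only extends the current row
lemma fold_small_pos (l : List Char) : ∀ (row : List Char) (filled : Nat)
    (parts : List (List Char)) (d : Nat), 0 < filled → filled + l.length ≤ 8 →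
    List.foldl pvStep (parts, row, filled, d) l
      = (parts, row ++ l.flatMap (fun x => ['#', fch x]), filled + l.length, d) := by
  induction l with
  | nil => intro row filled parts d _ _; simp
  | cons c t ih =>
    intro row filled parts d hpos hle
    have hne : filled + 1 ≠ 9 := by simp at hle; omega
    have hne0 : filled ≠ 0 := hpos.ne'
    rw [List.foldl_cons]
    have hstep : pvStep (parts, row, filled, d) c
        = (parts, row ++ ['#'] ++ [fch c], filled + 1, d) := by
      simp [pvStep, hne0, hne, fch]
    rw [hstep, ih _ (filled + 1) parts d (by omega) (by simp at hle ⊢; omega)]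
    simp [fch]
    omega

lemma fold_small (l : List Char) (hl : l.length ≤ 8)
    (parts : List (List Char)) (d : Nat) :
    List.foldl pvStep (parts, [], 0, d) l = (parts, rowF l, l.length, d) := by
  cases l with
  | nil => simp [rowF]
  | cons c t =>
    simp only [List.foldl_cons, pvStep]
    rw [if_neg (by simp), if_neg (by decide)]
    rw [fold_small_pos t _ 1 parts d (by omega) (by simp at hl ⊢; omega)]
    simp [rowF, fch]
    omega

-- the trailing while-loop pads with empty rows
lemma pad_spec (k : Nat) : ∀ (parts : List (List Char)) (row : List Char) (d : Nat),
    d + (k + 1) = 9 → pvPad parts row d = parts ++ row :: pvBorder :: rowsF [] k := by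
  induction k with
  | zero =>
    intro parts row d hd
    have : d = 8 := by omega
    subst this
    rw [pvPad]; simp
    rw [pvPad]; simp [rowsF]
  | succ k ih =>
    intro parts row d hd
    rw [pvPad, if_pos (by omega)]
    rw [ih _ [] (d + 1) (by omega)]
    simp [rowsF, rowF]

-- main invariant: streaming + padding produces the 2k lines of rowsF
lemma stream_spec (k : Nat) : ∀ (l : List Char) (parts : List (List Char)) (d : Nat),
    d + k = 9 →
    pvPad (List.foldl pvStep (parts, [], 0, d) (l.take (9 * k))).1
          (List.foldl pvStep (parts, [], 0, d) (l.take (9 * k))).2.1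
          (List.foldl pvStep (parts, [], 0, d) (l.take (9 * k))).2.2.2
      = parts ++ rowsF l k := by
  induction k with
  | zero =>
    intro l parts d hd
    have : d = 9 := by omega
    subst this
    simp only [Nat.mul_zero, List.take_zero, List.foldl_nil]
    rw [pvPad]; simp [rowsF]
  | succ k ih =>
    intro l parts d hd
    by_cases h9 : 9 ≤ l.length
    · have hsplit : l.take (9 * (k + 1)) = l.take 9 ++ (l.drop 9).take (9 * k) := by
        rw [show 9 * (k + 1) = 9 + 9 * k by ring, List.take_add]
      rw [hsplit,
        chunk (l.take 9) (by simp [h9]) _ parts d,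
        ih (l.drop 9) (parts ++ [rowF (l.take 9), pvBorder]) (d + 1) (by omega)]
      simp [rowsF]
    · have hle : l.length ≤ 8 := by omega
      have htake : l.take (9 * (k + 1)) = l := List.take_of_length_le (by omega)
      rw [htake, fold_small l hle parts d]
      rw [pad_spec k parts (rowF l) d (by omega)]
      simp [rowsF, List.take_of_length_le (by omega : l.length ≤ 9),
        List.drop_eq_nil_of_le (by omega : l.length ≤ 9)]

-- ===== VERDICT (by name: the statement is the Claim_ definition above) =====
set_option maxRecDepth 8000 in
theorem output_grid_spec : Claim_equal_output_grid := by
  intro grid _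
  unfold Spec_output_grid output_grid output_grid_alt
  have hslice : PySem.List.slice grid.toList none (some 81) = grid.toList.take 81 := by
    simp [pysem]
  simp only [hslice]
  rw [show (81 : Nat) = 9 * 9 by norm_num]
  rw [stream_spec 9 grid.toList [pvBorder] 0 rfl]
  simp only [replace_single]
  simp [PySem.List.pyRange, List.range_succ, rowsF, pvBorder, ← rowF_join,
    PySem.Chars.join, PySem.List.slice_toNat, List.intercalate,
    List.map_take, List.map_drop]
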